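-- pv_equiv track=rewrite | github.com/mhngu23/Variable-Agnostic-Causal-Exploration-for-Reinforcement-Learning-VACERL | src/Causal_Discovery_Algorithm/plot_heatmap.py | create_grid_dict
-- ===== SOURCE A (Python) =====
-- def create_grid_dict(env_name):
--     if env_name == "4x4FL":
--         lake_dict = {}
--
--         # Define the ranges for each component of the key
--         range_x = range(16)
--         range_y = range(4)
--
--         # Initialize a counter for the values
--         counter = [0, 1, 8, 9]
--
--         # Iterate through all combinations of (x, y)
--         for x in range_x:
--             if x > 0:
--                 if x % 4 == 0:
--                     counter = [x + 10 for x in counter]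
--                 else:
--                     counter = [x + 2 for x in counter]
--             for y in range_y:
--                 # Create the key as a formatted string
--                 key = f"({x}, {y})"
--
--                 # Calculate the corresponding value based on the provided pattern
--                 value = counter[y]
--
--                 # Add the key-value pair to the dictionary
--                 lake_dict[key] = value
--         return lake_dict
--
--     elif env_name == "TaxiEnv-v3":
--         # Initialize an empty dictionary
--         taxi_dict = {}
--
--         # Define the ranges for each component of the key
--         range_x = range(5)
--         range_y = range(5)
--         range_z = range(6)
--
--         # Initialize a counter for the values
--         value_counter = [0, 1, 10, 11, 20, 21]
--
--         # Iterate through all combinations of (x, y, z)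
--         for x in range_x:
--             if x > 0:
--                 value_counter =  [x + 22 for x in value_counter]
--             for y in range_y:
--                 if y > 0:
--                     value_counter =  [x + 2 for x in value_counter]
--                 for z in range_z:
--                     # Create the key as a formatted string
--                     key = f"({x}, {y}, {z})"
--
--                     value = value_counter[z]
--
--                     # Add the key-value pair to the dictionary
--                     taxi_dict[key] = value
--
--         return taxi_dict
--
--     elif env_name == 'MG_1':
--         minigrid_dict = {}
--
--         # Define the ranges for each component of the key
--         range_x = range(1,6)
--         range_y = range(1,3)
--         range_z = range(6)
--
--         # Initialize a counter for the values
--         value_counter = [0, 1, 2, 3, 4, 5]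
--
--         # Iterate through all combinations of (x, y, z)
--         for y in range_y:
--             if y > 1:
--                 value_counter =  [x + 6 for x in value_counter]
--             for x in range_x:
--                 if x > 1:
--                     value_counter =  [x + 6 for x in value_counter]
--                 for z in range_z:
--                     # Create the key as a formatted string
--                     key = f"({x}, {y}, {z})"
--
--                     value = value_counter[z]
--
--                     # Add the key-value pair to the dictionary
--                     minigrid_dict[key] = value
--         return minigrid_dict
-- ===== SOURCE B (Python) =====
-- def create_grid_dict(env_name):
--     if env_name == "4x4FL":
--         base = [0, 1, 8, 9]
--         return {f"({x}, {y})": base[y] + 2 * x + 8 * (x // 4)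
--                 for x in range(16) for y in range(4)}
--     elif env_name == "TaxiEnv-v3":
--         base = [0, 1, 10, 11, 20, 21]
--         return {f"({x}, {y}, {z})": base[z] + 30 * x + 2 * y
--                 for x in range(5) for y in range(5) for z in range(6)}
--     elif env_name == 'MG_1':
--         return {f"({x}, {y}, {z})": z + 6 * (5 * (y - 1) + (x - 1))
--                 for y in range(1, 3) for x in range(1, 6) for z in range(6)}
-- ===== Notes on version B (the rewrite author's own statement) =====
-- stated objective: simpler
-- what changed: Replaced A's mutating counter lists carried across loop iterations with dict comprehensions computing each value by a closed-form arithmetic formula from the coordinates.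
import Mathlib
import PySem

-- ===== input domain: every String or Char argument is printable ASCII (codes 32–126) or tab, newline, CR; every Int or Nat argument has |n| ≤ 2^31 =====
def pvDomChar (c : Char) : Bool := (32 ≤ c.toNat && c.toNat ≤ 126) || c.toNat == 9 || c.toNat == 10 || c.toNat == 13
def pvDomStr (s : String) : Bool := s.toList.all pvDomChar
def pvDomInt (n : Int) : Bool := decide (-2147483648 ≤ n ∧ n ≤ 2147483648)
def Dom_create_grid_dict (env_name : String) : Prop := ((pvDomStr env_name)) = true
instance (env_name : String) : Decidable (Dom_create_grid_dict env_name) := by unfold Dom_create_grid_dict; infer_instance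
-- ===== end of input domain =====

-- B replaces A's carried-over mutating counter lists with a direct closed-form value per key (objective: simpler).

-- ===== PORT A =====
-- key f"({x}, {y})"
def pvKey2 (x y : Int) : String :=
  String.mk (['('] ++ PySem.Int.toChars x ++ [',', ' '] ++ PySem.Int.toChars y ++ [')'])
-- key f"({x}, {y}, {z})"
def pvKey3 (x y z : Int) : String :=
  String.mk (['('] ++ PySem.Int.toChars x ++ [',', ' '] ++ PySem.Int.toChars y ++ [',', ' '] ++ PySem.Int.toChars z ++ [')'])

def create_grid_dict (env_name : String) : Option (List (String × Int)) :=
  if env_name = "4x4FL" then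
    let st :=
      (PySem.List.pyRange 0 16 1).foldl (fun (st : PySem.Dict String Int × List Int) x =>
        let counter :=
          if x > 0 then
            if PySem.Int.mod x 4 = 0 then st.2.map (· + 10) else st.2.map (· + 2)
          else st.2
        let d := (PySem.List.pyRange 0 4 1).foldl (fun d y =>
          -- counter[y]: index always in range in A, pyGet? is some; getD 0 never used
          d.insert (pvKey2 x y) ((PySem.List.pyGet? counter y).getD 0)) st.1
        (d, counter)) (PySem.Dict.empty, [0, 1, 8, 9])
    some st.1.items
  else if env_name = "TaxiEnv-v3" then
    let st :=
      (PySem.List.pyRange 0 5 1).foldl (fun (st : PySem.Dict String Int × List Int) x =>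
        let vc := if x > 0 then st.2.map (· + 22) else st.2
        (PySem.List.pyRange 0 5 1).foldl (fun (st : PySem.Dict String Int × List Int) y =>
          let vc := if y > 0 then st.2.map (· + 2) else st.2
          let d := (PySem.List.pyRange 0 6 1).foldl (fun d z =>
            d.insert (pvKey3 x y z) ((PySem.List.pyGet? vc z).getD 0)) st.1
          (d, vc)) (st.1, vc)) (PySem.Dict.empty, [0, 1, 10, 11, 20, 21])
    some st.1.items
  else if env_name = "MG_1" then
    let st :=
      (PySem.List.pyRange 1 3 1).foldl (fun (st : PySem.Dict String Int × List Int) y =>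
        let vc := if y > 1 then st.2.map (· + 6) else st.2
        (PySem.List.pyRange 1 6 1).foldl (fun (st : PySem.Dict String Int × List Int) x =>
          let vc := if x > 1 then st.2.map (· + 6) else st.2
          let d := (PySem.List.pyRange 0 6 1).foldl (fun d z =>
            d.insert (pvKey3 x y z) ((PySem.List.pyGet? vc z).getD 0)) st.1
          (d, vc)) (st.1, vc)) (PySem.Dict.empty, [0, 1, 2, 3, 4, 5])
    some st.1.items
  else
    none

-- ===== PORT B =====
def create_grid_dict_alt (env_name : String) : Option (List (String × Int)) :=
  if env_name = "4x4FL" then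
    some ((PySem.List.pyRange 0 16 1).flatMap (fun x =>
      (PySem.List.pyRange 0 4 1).map (fun y =>
        (pvKey2 x y, (PySem.List.pyGet? [0, 1, 8, 9] y).getD 0 + 2 * x + 8 * PySem.Int.floordiv x 4))))
  else if env_name = "TaxiEnv-v3" then
    some ((PySem.List.pyRange 0 5 1).flatMap (fun x =>
      (PySem.List.pyRange 0 5 1).flatMap (fun y =>
        (PySem.List.pyRange 0 6 1).map (fun z =>
          (pvKey3 x y z, (PySem.List.pyGet? [0, 1, 10, 11, 20, 21] z).getD 0 + 30 * x + 2 * y)))))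
  else if env_name = "MG_1" then
    some ((PySem.List.pyRange 1 3 1).flatMap (fun y =>
      (PySem.List.pyRange 1 6 1).flatMap (fun x =>
        (PySem.List.pyRange 0 6 1).map (fun z =>
          (pvKey3 x y z, z + 6 * (5 * (y - 1) + (x - 1)))))))
  else
    none

-- ===== PRECONDITION & SPEC =====
def Spec_create_grid_dict (env_name : String) (out : Option (List (String × Int))) : Prop := out = create_grid_dict_alt env_name
instance (env_name : String) (out : Option (List (String × Int))) : Decidable (Spec_create_grid_dict env_name out) := by unfold Spec_create_grid_dict; infer_instance

-- ===== CLAIM (what is proved, stated in full; the proofs are below) =====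
def Claim_equal_create_grid_dict : Prop := ∀ (env_name : String), Dom_create_grid_dict env_name → Spec_create_grid_dict env_name (create_grid_dict env_name)

-- ===== LEMMAS AND PROOFS =====

set_option maxRecDepth 10000 in
theorem eq_4x4FL : create_grid_dict "4x4FL" = create_grid_dict_alt "4x4FL" := by decide
set_option maxRecDepth 40000 in
theorem eq_taxi : create_grid_dict "TaxiEnv-v3" = create_grid_dict_alt "TaxiEnv-v3" := by decide
set_option maxRecDepth 40000 in
theorem eq_mg1 : create_grid_dict "MG_1" = create_grid_dict_alt "MG_1" := by decide

-- ===== VERDICT (by name: the statement is the Claim_ definition above) =====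
theorem create_grid_dict_spec : Claim_equal_create_grid_dict := by
  intro s _
  unfold Spec_create_grid_dict
  by_cases h1 : s = "4x4FL"
  · subst h1; exact eq_4x4FL
  · by_cases h2 : s = "TaxiEnv-v3"
    · subst h2; exact eq_taxi
    · by_cases h3 : s = "MG_1"
      · subst h3; exact eq_mg1
      · simp [create_grid_dict, create_grid_dict_alt, h1, h2, h3]
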